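-- pv_equiv track=rewrite | github.com/victor-luu191/hacker_rank_train | medium/queen_atk.py | find_lower_part
-- ===== SOURCE A (Python) =====
-- def find_lower_part(cell, lower_left_boundary, upper_right_boundary, diag):
--     # stop when the cell hits lower boundary OR right/left boundary (if diag=1/diag=2)
--
--     r, c = cell[0], cell[1]
--     if diag == 1:
--         # if hit lower boundary then stop
--         if r == lower_left_boundary or c == upper_right_boundary:
--             return []
--         # else, add the cell below given cell and continue if possible
--         lower_cell = [r - 1, c + 1]
--         return [lower_cell] + find_lower_part(lower_cell, lower_left_boundary, upper_right_boundary, diag)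
--     if diag == 2:
--         if r == lower_left_boundary or c == lower_left_boundary:
--             return []
--         lower_cell = [r - 1, c - 1]
--         return [lower_cell] + find_lower_part(lower_cell, lower_left_boundary, upper_right_boundary, diag)
-- ===== SOURCE B (Python) =====
-- def find_lower_part(cell, lower_left_boundary, upper_right_boundary, diag):
--     r, c = cell[0], cell[1]
--     if diag == 1:
--         dc, stop_col = 1, upper_right_boundary
--     elif diag == 2:
--         dc, stop_col = -1, lower_left_boundary
--     else:
--         return None
--     path = []
--     while r != lower_left_boundary and c != stop_col:
--         r, c = r - 1, c + dc
--         path.append([r, c])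
--     return path
-- ===== Notes on version B (the rewrite author's own statement) =====
-- stated objective: simpler
-- what changed: Replaced A's per-cell recursion with repeated front-concatenation by a single iterative while-loop that appends each next diagonal cell to an accumulator (step and stop column chosen once from diag), returning None for other diag values.
import Mathlib
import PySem

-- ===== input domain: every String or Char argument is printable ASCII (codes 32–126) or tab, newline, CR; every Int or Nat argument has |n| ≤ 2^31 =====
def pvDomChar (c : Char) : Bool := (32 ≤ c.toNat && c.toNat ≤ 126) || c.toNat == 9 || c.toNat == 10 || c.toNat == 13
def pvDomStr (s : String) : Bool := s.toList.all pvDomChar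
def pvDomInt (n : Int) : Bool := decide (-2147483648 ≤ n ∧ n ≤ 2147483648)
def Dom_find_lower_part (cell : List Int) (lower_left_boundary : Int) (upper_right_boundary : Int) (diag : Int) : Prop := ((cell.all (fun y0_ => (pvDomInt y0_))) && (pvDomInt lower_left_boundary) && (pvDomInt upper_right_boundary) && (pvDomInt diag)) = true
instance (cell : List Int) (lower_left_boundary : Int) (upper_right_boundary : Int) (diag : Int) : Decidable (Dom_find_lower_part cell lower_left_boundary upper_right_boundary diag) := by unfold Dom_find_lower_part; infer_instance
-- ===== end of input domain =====

-- B replaces A's recursion with front-concatenation by an iterative accumulator loop; equivalence on inputs where A terminates.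

-- ===== PORT A =====
-- A's recursion, with fuel only to make it total in Lean; inside Pre_ the fuel is
-- never exhausted (it exceeds the number of recursion steps), so this is A's computation.
def findLowerA (fuel : Nat) (r c llb urb diag : Int) : List (List Int) :=
  match fuel with
  | 0 => []
  | fuel + 1 =>
    if diag = 1 then
      if r = llb ∨ c = urb then []
      else [r - 1, c + 1] :: findLowerA fuel (r - 1) (c + 1) llb urb diag
    else if diag = 2 then
      if r = llb ∨ c = llb then []
      else [r - 1, c - 1] :: findLowerA fuel (r - 1) (c - 1) llb urb diag
    else []

def find_lower_part (cell : List Int) (lower_left_boundary : Int) (upper_right_boundary : Int) (diag : Int) : Option (List (List Int)) :=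
  -- r, c = cell[0], cell[1]  (IndexError if len(cell) < 2: outside Pre_, port returns none)
  match cell with
  | r :: c :: _ =>
    if diag = 1 ∨ diag = 2 then
      some (findLowerA ((r - lower_left_boundary).natAbs + (upper_right_boundary - c).natAbs + (c - lower_left_boundary).natAbs + 1) r c lower_left_boundary upper_right_boundary diag)
    else none  -- falls off the end of the function: Python returns None
  | _ => none

-- ===== PORT B =====
-- B's while-loop as a tail recursion on an accumulator (same fuel bound, never hit inside Pre_).
def findLowerB (fuel : Nat) (r c dc llb stopCol : Int) (path : List (List Int)) : List (List Int) :=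
  match fuel with
  | 0 => path.reverse
  | fuel + 1 =>
    if r ≠ llb ∧ c ≠ stopCol then
      findLowerB fuel (r - 1) (c + dc) dc llb stopCol ([r - 1, c + dc] :: path)
    else path.reverse

def find_lower_part_alt (cell : List Int) (lower_left_boundary : Int) (upper_right_boundary : Int) (diag : Int) : Option (List (List Int)) :=
  match cell with
  | [] => none
  | [_] => none
  | r :: c :: _ =>
    if diag = 1 then
      some (findLowerB ((r - lower_left_boundary).natAbs + (upper_right_boundary - c).natAbs + (c - lower_left_boundary).natAbs + 1) r c 1 lower_left_boundary upper_right_boundary [])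
    else if diag = 2 then
      some (findLowerB ((r - lower_left_boundary).natAbs + (upper_right_boundary - c).natAbs + (c - lower_left_boundary).natAbs + 1) r c (-1) lower_left_boundary lower_left_boundary [])
    else none

-- ===== PRECONDITION & SPEC =====
-- Pre_ excludes inputs on which Python A raises: cells with fewer than two entries (IndexError
-- on cell[0]/cell[1]) and diag=1/diag=2 starts that never meet a boundary (infinite recursion,
-- i.e. RecursionError).
def Pre_find_lower_part (cell : List Int) (lower_left_boundary : Int) (upper_right_boundary : Int) (diag : Int) : Prop :=
  2 ≤ cell.length ∧
  (diag = 1 → lower_left_boundary ≤ cell.getD 0 0 ∨ cell.getD 1 0 ≤ upper_right_boundary) ∧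
  (diag = 2 → lower_left_boundary ≤ cell.getD 0 0 ∨ lower_left_boundary ≤ cell.getD 1 0)
instance (cell : List Int) (lower_left_boundary : Int) (upper_right_boundary : Int) (diag : Int) : Decidable (Pre_find_lower_part cell lower_left_boundary upper_right_boundary diag) := by unfold Pre_find_lower_part; infer_instance

def pvWitness_find_lower_part : List Int × Int × Int × Int := ([3, 1], 0, 4, 1)

def Spec_find_lower_part (cell : List Int) (lower_left_boundary : Int) (upper_right_boundary : Int) (diag : Int) (out : Option (List (List Int))) : Prop := out = find_lower_part_alt cell lower_left_boundary upper_right_boundary diag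
instance (cell : List Int) (lower_left_boundary : Int) (upper_right_boundary : Int) (diag : Int) (out : Option (List (List Int))) : Decidable (Spec_find_lower_part cell lower_left_boundary upper_right_boundary diag out) := by unfold Spec_find_lower_part; infer_instance

-- ===== CLAIM (what is proved, stated in full; the proofs are below) =====
def Claim_equal_find_lower_part : Prop := ∀ (cell : List Int) (lower_left_boundary : Int) (upper_right_boundary : Int) (diag : Int), Dom_find_lower_part cell lower_left_boundary upper_right_boundary diag → Pre_find_lower_part cell lower_left_boundary upper_right_boundary diag → Spec_find_lower_part cell lower_left_boundary upper_right_boundary diag (find_lower_part cell lower_left_boundary upper_right_boundary diag)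

-- ===== LEMMAS AND PROOFS =====

-- diag = 1: with sufficient fuel, B's accumulator loop produces acc.reverse ++ A's path.
lemma loop_eq_rec_diag1 (llb urb : Int) :
    ∀ (fuel : Nat) (r c : Int) (acc : List (List Int)),
      ((llb ≤ r ∧ (r - llb).natAbs < fuel) ∨ (c ≤ urb ∧ (urb - c).natAbs < fuel)) →
      findLowerB fuel r c 1 llb urb acc = acc.reverse ++ findLowerA fuel r c llb urb 1 := by
  intro fuel
  induction fuel with
  | zero => intro r c acc h; omega
  | succ fuel ih =>
    intro r c acc h
    by_cases hstop : r = llb ∨ c = urb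
    · have hb : ¬(r ≠ llb ∧ c ≠ urb) := by tauto
      simp [findLowerA, findLowerB, hb, hstop]
    · have ht : r ≠ llb ∧ c ≠ urb := by tauto
      have h' : (llb ≤ r - 1 ∧ (r - 1 - llb).natAbs < fuel) ∨ (c + 1 ≤ urb ∧ (urb - (c + 1)).natAbs < fuel) := by omega
      simp only [findLowerA, findLowerB, if_pos rfl, if_pos ht, if_neg hstop]
      rw [ih (r - 1) (c + 1) ([r - 1, c + 1] :: acc) h']
      simp

-- diag = 2: same, with step -1 and stop column llb.
lemma loop_eq_rec_diag2 (llb urb : Int) :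
    ∀ (fuel : Nat) (r c : Int) (acc : List (List Int)),
      ((llb ≤ r ∧ (r - llb).natAbs < fuel) ∨ (llb ≤ c ∧ (c - llb).natAbs < fuel)) →
      findLowerB fuel r c (-1) llb llb acc = acc.reverse ++ findLowerA fuel r c llb urb 2 := by
  intro fuel
  induction fuel with
  | zero => intro r c acc h; omega
  | succ fuel ih =>
    intro r c acc h
    by_cases hstop : r = llb ∨ c = llb
    · have hb : ¬(r ≠ llb ∧ c ≠ llb) := by tauto
      simp [findLowerA, findLowerB, hb, hstop]
    · have ht : r ≠ llb ∧ c ≠ llb := by tauto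
      have h' : (llb ≤ r - 1 ∧ (r - 1 - llb).natAbs < fuel) ∨ (llb ≤ c - 1 ∧ (c - 1 - llb).natAbs < fuel) := by omega
      simp only [findLowerA, findLowerB, if_neg (by decide : ¬((2:Int) = 1)), if_pos rfl,
        if_pos ht, if_neg hstop]
      rw [show c + (-1 : Int) = c - 1 by ring, ih (r - 1) (c - 1) ([r - 1, c - 1] :: acc) h']
      simp

-- ===== VERDICT (by name: the statement is the Claim_ definition above) =====
theorem find_lower_part_spec : Claim_equal_find_lower_part := by
  intro cell llb urb diag _hdom hpre
  obtain ⟨hlen, h1, h2⟩ := hpre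
  unfold Spec_find_lower_part find_lower_part find_lower_part_alt
  rcases cell with _ | ⟨r, _ | ⟨c, rest⟩⟩
  · rfl
  · rfl
  · dsimp only
    simp only [List.getD, List.getElem?_cons_zero, List.getElem?_cons_succ, Option.getD_some] at h1 h2
    by_cases hd1 : diag = 1
    · subst hd1
      have hx := h1 rfl
      rw [if_pos (Or.inl rfl), if_pos rfl,
        loop_eq_rec_diag1 llb urb _ r c [] (by omega)]
      simp
    · by_cases hd2 : diag = 2
      · subst hd2
        have hx := h2 rfl
        rw [if_pos (Or.inr rfl), if_neg hd1,
          loop_eq_rec_diag2 llb urb _ r c [] (by omega)]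
        simp
      · simp [hd1, hd2]
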